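-- pv_equiv track=rewrite | github.com/daniel-mf-92/holyc-inference | tests/test_gguf_tensor_data_base.py | validate_sorted_position_map
-- ===== SOURCE A (Python) =====
-- GGUF_TDBASE_OK = 0
--
-- GGUF_TDBASE_ERR_NULL_PTR = 1
--
-- GGUF_TDBASE_ERR_OUT_OF_BOUNDS = 7
--
-- def validate_sorted_position_map(
--     sorted_tensor_indices: list[int],
--     sorted_position_by_tensor: list[int],
-- ):
--     count = len(sorted_tensor_indices)
--     if len(sorted_position_by_tensor) != count:
--         return GGUF_TDBASE_ERR_NULL_PTR, 0
--
--     for i in range(count):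
--         sorted_pos = sorted_position_by_tensor[i]
--
--         if sorted_pos >= count:
--             return GGUF_TDBASE_ERR_OUT_OF_BOUNDS, i
--
--         for j in range(i):
--             if sorted_position_by_tensor[j] == sorted_pos:
--                 return GGUF_TDBASE_ERR_OUT_OF_BOUNDS, i
--
--         if sorted_tensor_indices[sorted_pos] != i:
--             return GGUF_TDBASE_ERR_OUT_OF_BOUNDS, i
--
--     for i in range(count):
--         orig_idx = sorted_tensor_indices[i]
--
--         if orig_idx >= count:
--             return GGUF_TDBASE_ERR_OUT_OF_BOUNDS, i
--
--         if sorted_position_by_tensor[orig_idx] != i: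
--             return GGUF_TDBASE_ERR_OUT_OF_BOUNDS, i
--
--     return GGUF_TDBASE_OK, 0
-- ===== SOURCE B (Python) =====
-- GGUF_TDBASE_OK = 0
--
-- GGUF_TDBASE_ERR_NULL_PTR = 1
--
-- GGUF_TDBASE_ERR_OUT_OF_BOUNDS = 7
--
--
-- def _first_bad(values, inverse, count):
--     # First index i whose value fails "value < count and inverse[value] == i",
--     # or None.  Used for both directions of the inverse-permutation check.
--     return next((i for i, v in enumerate(values)
--                  if v >= count or inverse[v] != i), None)
--
--
-- def validate_sorted_position_map(
--     sorted_tensor_indices: list[int],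
--     sorted_position_by_tensor: list[int],
-- ):
--     count = len(sorted_tensor_indices)
--     if len(sorted_position_by_tensor) != count:
--         return GGUF_TDBASE_ERR_NULL_PTR, 0
--
--     # A's inner duplicate scan is redundant: a repeated position fails the
--     # inverse check sorted_tensor_indices[v] != i at the same index.
--     bad = _first_bad(sorted_position_by_tensor, sorted_tensor_indices, count)
--     if bad is None:
--         bad = _first_bad(sorted_tensor_indices, sorted_position_by_tensor, count)
--     if bad is None:
--         return GGUF_TDBASE_OK, 0
--     return GGUF_TDBASE_ERR_OUT_OF_BOUNDS, bad
-- ===== Notes on version B (the rewrite author's own statement) =====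
-- stated objective: simpler
-- what changed: B replaces A's two early-return loops (the first with an O(n) inner duplicate scan) by one shared declarative 'first failing index' search used in both directions; the duplicate scan is dropped because a repeated position fails the inverse-value check at the same index.
import Mathlib
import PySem

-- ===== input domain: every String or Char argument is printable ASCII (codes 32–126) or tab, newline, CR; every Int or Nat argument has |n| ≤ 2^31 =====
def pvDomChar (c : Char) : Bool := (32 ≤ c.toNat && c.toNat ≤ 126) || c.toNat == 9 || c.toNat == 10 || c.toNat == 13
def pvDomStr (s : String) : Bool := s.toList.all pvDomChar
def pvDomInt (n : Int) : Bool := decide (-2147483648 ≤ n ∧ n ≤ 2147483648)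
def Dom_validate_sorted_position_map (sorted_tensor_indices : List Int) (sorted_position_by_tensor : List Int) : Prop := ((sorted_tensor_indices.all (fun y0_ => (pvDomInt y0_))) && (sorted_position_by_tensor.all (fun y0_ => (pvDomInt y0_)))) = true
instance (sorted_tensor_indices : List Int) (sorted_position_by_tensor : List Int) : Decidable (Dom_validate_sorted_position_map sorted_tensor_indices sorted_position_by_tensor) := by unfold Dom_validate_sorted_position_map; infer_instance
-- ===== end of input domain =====

-- B replaces A's two early-return loops (the first carrying an O(n) inner duplicate scan,
-- redundant because a repeated position fails the inverse-value check at the same index)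
-- by one shared declarative "first failing index" search applied in both directions: simpler.

-- ===== PORT A =====
-- `for j in range(i): if spbt[j] == p: return` — j is always in range (lengths are equal), so getD is exact
def pvDupScan (spbt : List Int) (i : Nat) (p : Int) : Bool :=
  (List.range i).any (fun j => spbt.getD j 0 == p)

-- first `for i in range(count)` loop of A; `some r` = early return, `none` = fell through,
-- `some (-1,-1)` is the (unreachable inside Pre_) IndexError of `sorted_tensor_indices[sorted_pos]`
def pvLoopA1 (sti spbt : List Int) (count : Nat) : Nat → Nat → Option (Int × Int)
  | _, 0 => none
  | i, rem + 1 =>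
    let p := spbt.getD i 0          -- spbt[i], i in range since len(spbt) = count
    if (count : Int) ≤ p then some (7, (i : Int))
    else if pvDupScan spbt i p then some (7, (i : Int))
    else match PySem.List.pyGet? sti p with
      | none => some (-1, -1)       -- Python raises IndexError here; excluded by Pre_
      | some v => if v ≠ (i : Int) then some (7, (i : Int)) else pvLoopA1 sti spbt count (i + 1) rem

-- second `for i in range(count)` loop of A
def pvLoopA2 (sti spbt : List Int) (count : Nat) : Nat → Nat → Option (Int × Int)
  | _, 0 => none
  | i, rem + 1 =>
    let orig := sti.getD i 0        -- sti[i], i in range since len(sti) = count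
    if (count : Int) ≤ orig then some (7, (i : Int))
    else match PySem.List.pyGet? spbt orig with
      | none => some (-1, -1)       -- Python raises IndexError here; excluded by Pre_
      | some v => if v ≠ (i : Int) then some (7, (i : Int)) else pvLoopA2 sti spbt count (i + 1) rem

def validate_sorted_position_map (sorted_tensor_indices : List Int) (sorted_position_by_tensor : List Int) : Int × Int :=
  let count := sorted_tensor_indices.length
  if sorted_position_by_tensor.length ≠ count then (1, 0)
  else match pvLoopA1 sorted_tensor_indices sorted_position_by_tensor count 0 count with
    | some r => r
    | none => match pvLoopA2 sorted_tensor_indices sorted_position_by_tensor count 0 count with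
      | some r => r
      | none => (0, 0)

-- ===== PORT B =====
-- the shared per-element test of `_first_bad`: `v >= count or inverse[v] != i`;
-- `some (-1,-1)` marks the IndexError of `inverse[v]` (excluded by Pre_), other `some` = bad index i
def pvCheck (inverse : List Int) (count : Nat) (vi : Int × Nat) : Option (Int × Int) :=
  if (count : Int) ≤ vi.1 then some (7, (vi.2 : Int))
  else match PySem.List.pyGet? inverse vi.1 with
    | none => some (-1, -1)
    | some w => if w ≠ (vi.2 : Int) then some (7, (vi.2 : Int)) else none

-- `_first_bad(values, inverse, count)` = first `some` of pvCheck over enumerate(values)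
def pvFirstBad (values inverse : List Int) (count : Nat) : Option (Int × Int) :=
  values.zipIdx.findSome? (pvCheck inverse count)

def validate_sorted_position_map_alt (sorted_tensor_indices : List Int) (sorted_position_by_tensor : List Int) : Int × Int :=
  let count := sorted_tensor_indices.length
  if sorted_position_by_tensor.length ≠ count then (1, 0)
  else
    ((pvFirstBad sorted_position_by_tensor sorted_tensor_indices count).orElse
      (fun _ => pvFirstBad sorted_tensor_indices sorted_position_by_tensor count)).getD (0, 0)

-- ===== PRECONDITION & SPEC =====
-- `pvPass sti spbt j` = iteration j of A's first loop completes without returning or raising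
def pvPass (sti spbt : List Int) (j : Nat) : Bool :=
  decide (spbt.getD j 0 < (sti.length : Int)) &&
  decide (-(sti.length : Int) ≤ spbt.getD j 0) &&
  decide (∀ k < j, spbt.getD k 0 ≠ spbt.getD j 0) &&
  decide (PySem.List.pyGet? sti (spbt.getD j 0) = some (j : Int))

-- Pre_ excludes exactly the inputs where Python A raises IndexError: a position below
-- -len reached by the first loop (the second loop can only run on an exact inverse pair,
-- where every index it uses is in range, so it never raises).
def Pre_validate_sorted_position_map (sorted_tensor_indices : List Int) (sorted_position_by_tensor : List Int) : Prop :=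
  sorted_position_by_tensor.length = sorted_tensor_indices.length →
  ∀ i < sorted_tensor_indices.length,
    (∀ j < i, pvPass sorted_tensor_indices sorted_position_by_tensor j = true) →
    -(sorted_tensor_indices.length : Int) ≤ sorted_position_by_tensor.getD i 0

instance (sorted_tensor_indices : List Int) (sorted_position_by_tensor : List Int) : Decidable (Pre_validate_sorted_position_map sorted_tensor_indices sorted_position_by_tensor) := by unfold Pre_validate_sorted_position_map; infer_instance

def pvWitness_validate_sorted_position_map : List Int × List Int := ([0, 1], [0, 1])

def Spec_validate_sorted_position_map (sorted_tensor_indices : List Int) (sorted_position_by_tensor : List Int) (out : Int × Int) : Prop := out = validate_sorted_position_map_alt sorted_tensor_indices sorted_position_by_tensor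
instance (sorted_tensor_indices : List Int) (sorted_position_by_tensor : List Int) (out : Int × Int) : Decidable (Spec_validate_sorted_position_map sorted_tensor_indices sorted_position_by_tensor out) := by unfold Spec_validate_sorted_position_map; infer_instance

-- ===== CLAIM (what is proved, stated in full; the proofs are below) =====
def Claim_equal_validate_sorted_position_map : Prop := ∀ (sorted_tensor_indices : List Int) (sorted_position_by_tensor : List Int), Dom_validate_sorted_position_map sorted_tensor_indices sorted_position_by_tensor → Pre_validate_sorted_position_map sorted_tensor_indices sorted_position_by_tensor → Spec_validate_sorted_position_map sorted_tensor_indices sorted_position_by_tensor (validate_sorted_position_map sorted_tensor_indices sorted_position_by_tensor)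

-- ===== LEMMAS AND PROOFS =====
-- A's first loop equals B's findSome? search as soon as every completed earlier iteration j
-- established pyGet? sti (spbt[j]) = some j: if A's duplicate scan fires at i, that invariant
-- forces B's inverse check to fail at the same i (sti[p] = some j ≠ i). The agreement holds on
-- ALL inputs (both ports mark a raise with the same sentinel), so Pre_ is not needed below.
theorem pvLoop1_eq (sti spbt : List Int) (c : Nat) (hs : spbt.length = c) :
    ∀ rem i, i + rem = c →
      (∀ j, j < i → PySem.List.pyGet? sti (spbt.getD j 0) = some (j : Int)) →
      pvLoopA1 sti spbt c i rem = (spbt.drop i).zipIdx.findSome? (fun vi => pvCheck sti c (vi.1, vi.2 + i)) := by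
  intro rem
  induction rem with
  | zero =>
    intro i hi _
    rw [List.drop_of_length_le (by omega)]
    rfl
  | succ k ih =>
    intro i hi hinv
    have hilen : i < spbt.length := by omega
    have hdrop : spbt.drop i = spbt.getD i 0 :: spbt.drop (i + 1) := by
      rw [List.drop_eq_getElem_cons hilen, List.getD_eq_getElem spbt 0 hilen]
    rw [pvLoopA1, hdrop, List.zipIdx_cons, List.findSome?_cons]
    set p := spbt.getD i 0 with hp
    have hshift : ((spbt.drop (i+1)).zipIdx 1).findSome? (fun vi => pvCheck sti c (vi.1, vi.2 + i)) =
        ((spbt.drop (i+1)).zipIdx).findSome? (fun vi => pvCheck sti c (vi.1, vi.2 + (i+1))) := by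
      have hm : (spbt.drop (i+1)).zipIdx 1 = ((spbt.drop (i+1)).zipIdx).map (fun vi => (vi.1, vi.2 + 1)) := by
        simp [List.zipIdx_succ]
      rw [hm, List.findSome?_map]
      congr 1
      funext vi
      simp only [Function.comp]
      congr 2
      omega
    by_cases hge : (c : Int) ≤ p
    · simp [pvCheck, hge]
    · by_cases hdup : pvDupScan spbt i p = true
      · -- duplicate: some j < i with spbt[j] = p, and then pyGet? sti p = some j ≠ i
        obtain ⟨j, hj, hjp⟩ : ∃ j, j < i ∧ spbt.getD j 0 = p := by
          rcases List.any_eq_true.mp hdup with ⟨j, hjm, hbeq⟩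
          exact ⟨j, List.mem_range.mp hjm, beq_iff_eq.mp hbeq⟩
        have hget : PySem.List.pyGet? sti p = some (j : Int) := by
          rw [← hjp]; exact hinv j hj
        have hne : (j : Int) ≠ (i : Int) := by exact_mod_cast Nat.ne_of_lt hj
        rw [if_neg hge, if_pos hdup]
        simp [pvCheck, hge, hget, hne]
      · rw [if_neg hge, if_neg hdup]
        cases hget : PySem.List.pyGet? sti p with
        | none => simp [pvCheck, hge, hget]
        | some v =>
          by_cases hv : v ≠ (i : Int)
          · simp [pvCheck, hge, hget, hv]
          · rw [not_not] at hv
            have hrec := ih (i + 1) (by omega) (by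
              intro j hj
              rcases Nat.lt_succ_iff_lt_or_eq.mp hj with h | h
              · exact hinv j h
              · subst h; rw [hv] at hget; exact hget)
            have hc : pvCheck sti c (p, 0 + i) = none := by
              simp [pvCheck, hge, hget, hv]
            simp only [if_neg (not_not_intro hv), hc]
            rw [hrec, ← hshift]

theorem pvLoop2_eq (sti spbt : List Int) (c : Nat) (ht : sti.length = c) :
    ∀ rem i, i + rem = c →
      pvLoopA2 sti spbt c i rem = (sti.drop i).zipIdx.findSome? (fun vi => pvCheck spbt c (vi.1, vi.2 + i)) := by
  intro rem
  induction rem with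
  | zero =>
    intro i hi
    rw [List.drop_of_length_le (by omega)]
    rfl
  | succ k ih =>
    intro i hi
    have hilen : i < sti.length := by omega
    have hdrop : sti.drop i = sti.getD i 0 :: sti.drop (i + 1) := by
      rw [List.drop_eq_getElem_cons hilen, List.getD_eq_getElem sti 0 hilen]
    rw [pvLoopA2, hdrop, List.zipIdx_cons, List.findSome?_cons]
    set o := sti.getD i 0 with ho
    have hshift : ((sti.drop (i+1)).zipIdx 1).findSome? (fun vi => pvCheck spbt c (vi.1, vi.2 + i)) =
        ((sti.drop (i+1)).zipIdx).findSome? (fun vi => pvCheck spbt c (vi.1, vi.2 + (i+1))) := by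
      have hm : (sti.drop (i+1)).zipIdx 1 = ((sti.drop (i+1)).zipIdx).map (fun vi => (vi.1, vi.2 + 1)) := by
        simp [List.zipIdx_succ]
      rw [hm, List.findSome?_map]
      congr 1
      funext vi
      simp only [Function.comp]
      congr 2
      omega
    by_cases hge : (c : Int) ≤ o
    · simp [pvCheck, hge]
    · rw [if_neg hge]
      cases hget : PySem.List.pyGet? spbt o with
      | none => simp [pvCheck, hge, hget]
      | some v =>
        by_cases hv : v ≠ (i : Int)
        · simp [pvCheck, hge, hget, hv]
        · rw [not_not] at hv
          have hrec := ih (i + 1) (by omega)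
          have hc : pvCheck spbt c (o, 0 + i) = none := by
            simp [pvCheck, hge, hget, hv]
          simp only [if_neg (not_not_intro hv), hc]
          rw [hrec, ← hshift]

-- ===== VERDICT (by name: the statement is the Claim_ definition above) =====
theorem validate_sorted_position_map_spec : Claim_equal_validate_sorted_position_map := by
  unfold Claim_equal_validate_sorted_position_map
  intro sti spbt _ _
  unfold Spec_validate_sorted_position_map
  unfold validate_sorted_position_map validate_sorted_position_map_alt pvFirstBad
  by_cases hlen : spbt.length = sti.length
  · have h1 := pvLoop1_eq sti spbt sti.length hlen sti.length 0 (by omega)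
      (by intro j hj; omega)
    have h2 := pvLoop2_eq sti spbt sti.length rfl sti.length 0 (by omega)
    simp only [List.drop_zero] at h1 h2
    have e1 : spbt.zipIdx.findSome? (fun vi => pvCheck sti sti.length (vi.1, vi.2 + 0)) = spbt.zipIdx.findSome? (pvCheck sti sti.length) := by
      congr 1
    have e2 : sti.zipIdx.findSome? (fun vi => pvCheck spbt sti.length (vi.1, vi.2 + 0)) = sti.zipIdx.findSome? (pvCheck spbt sti.length) := by
      congr 1
    rw [e1] at h1; rw [e2] at h2
    simp only [hlen, if_neg (by omega : ¬ sti.length ≠ sti.length), h1, h2]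
    cases hA : spbt.zipIdx.findSome? (pvCheck sti sti.length) with
    | some r => simp [Option.orElse]
    | none =>
      cases hB : sti.zipIdx.findSome? (pvCheck spbt sti.length) with
      | some r => simp [Option.orElse]
      | none => simp [Option.orElse]
  · simp [hlen]
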